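-- pv_equiv track=rewrite | github.com/MlvPrasadOfficial/SCALER_DSML_MAR_2022_SOLUTIONS_BY_MLV_PRASAD | AA_ASSIGNMENTS/Day014 - DSML Intermediate DSA Bit Manipulations - 2/h02.py | solve
-- ===== SOURCE A (Python) =====
-- def solve(A):
--     ################
--     def check(x, A):
--         ct = 0
--         for a in A:
--             if (a & x) == x:
--                 ct += 1
--         if ct > 3:
--             return 1
--         return 0
--     #################
--
--     ans = 0
--     for i in range(32, -1, -1):
--         temp = ans | (1 << i)
--
--         if check(temp, A) == 1:
--
--             ans = temp
--
--     return ans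
-- ===== SOURCE B (Python) =====
-- def solve(A):
--     # Recursive partition refinement: descend bits MSB->LSB with the current
--     # candidate pool; if >3 candidates have bit i set, keep only those, take
--     # the bit, and OR it into the recursive answer for the lower bits.
--     def go(i, xs):
--         if i < 0:
--             return 0
--         hi = [a for a in xs if (a >> i) & 1]
--         if len(hi) > 3:
--             return (1 << i) | go(i - 1, hi)
--         return go(i - 1, xs)
--     return go(32, A)
-- ===== Notes on version B (the rewrite author's own statement) =====
-- stated objective: faster
-- what changed: Replaces the iterative greedy loop with its full-array counting helper by a recursive partition refinement: go(i, xs) tests only bit i of a shrinking candidate pool, keeps the >3-sized high partition when committing a bit, and assembles the answer by OR-ing on return.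
import Mathlib
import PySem

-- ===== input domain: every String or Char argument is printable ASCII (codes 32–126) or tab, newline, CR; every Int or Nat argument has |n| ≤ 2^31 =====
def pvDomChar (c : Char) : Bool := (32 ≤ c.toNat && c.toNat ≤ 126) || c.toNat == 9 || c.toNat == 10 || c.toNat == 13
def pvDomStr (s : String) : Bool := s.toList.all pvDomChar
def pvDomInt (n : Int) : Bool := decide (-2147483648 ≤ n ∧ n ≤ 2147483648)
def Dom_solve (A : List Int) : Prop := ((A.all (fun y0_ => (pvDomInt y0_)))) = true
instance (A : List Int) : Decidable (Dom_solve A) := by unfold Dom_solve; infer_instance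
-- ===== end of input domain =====

-- B replaces A's iterative greedy-with-counting-helper by a recursive partition
-- refinement over bits (single-bit tests on a shrinking pool, answer assembled on return); measured faster in a timing run, same results.


-- ===== PORT A =====
-- Python's inner helper `check(x, A)`; `1 << i` is ported as `1 <<< i.toNat`
-- (exact for the nonnegative i produced by range(32, -1, -1)).
def check (x : Int) (A : List Int) : Int :=
  let ct := A.foldl (fun ct a => if PySem.Int.band a x == x then ct + 1 else ct) (0 : Int)
  if ct > 3 then 1 else 0

def solve (A : List Int) : Int :=
  (PySem.List.pyRange 32 (-1) (-1)).foldl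
    (fun ans i =>
      let temp := PySem.Int.bor ans ((1 : Int) <<< i.toNat)
      if check temp A == 1 then temp else ans) 0

-- ===== PORT B =====
-- Source B's recursive helper `go(i, xs)`; `(a >> i) & 1` is ported with core `>>>`
-- and PySem.Int.band (exact for the nonnegative i reached before the i < 0 base case).
def solveGo (i : Int) (xs : List Int) : Int :=
  if i < 0 then 0
  else
    let hi := xs.filter (fun a => PySem.Int.band ((a : Int) >>> (i.toNat : Nat)) 1 != 0)
    if hi.length > 3 then PySem.Int.bor ((1 : Int) <<< i.toNat) (solveGo (i - 1) hi)
    else solveGo (i - 1) xs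
termination_by (i + 1).toNat
decreasing_by all_goals (simp at *; omega)

def solve_alt (A : List Int) : Int := solveGo 32 A

-- ===== PRECONDITION & SPEC =====
def Spec_solve (A : List Int) (out : Int) : Prop := out = solve_alt A
instance (A : List Int) (out : Int) : Decidable (Spec_solve A out) := by unfold Spec_solve; infer_instance

-- ===== CLAIM (what is proved, stated in full; the proofs are below) =====
def Claim_equal_solve : Prop := ∀ (A : List Int), Dom_solve A → Spec_solve A (solve A)

-- ===== LEMMAS AND PROOFS =====

-- "a is a supermask of x", A's membership test
def superB (x : Int) (a : Int) : Bool := PySem.Int.band a x == x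

-- bit j of a in Python's infinite two's complement
def aBit (a : Int) (j : Nat) : Bool := if 0 ≤ a then a.toNat.testBit j else !((-a - 1).toNat.testBit j)

-- Nat-level mirror of B's recursion (proof-side only)
def goN : Nat → List Int → Nat
  | 0, _ => 0
  | k + 1, xs =>
    let hi := xs.filter (fun a => aBit a k)
    if 3 < hi.length then (1 <<< k) ||| goN k hi else goN k xs

-- counting loop of `check` = length of the filtered list
lemma count_eq_filter_length (x : Int) (l : List Int) (c : Int) :
    l.foldl (fun ct a => if PySem.Int.band a x == x then ct + 1 else ct) c
      = c + ((l.filter (superB x)).length : Int) := by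
  induction l generalizing c with
  | nil => simp
  | cons a l ih =>
    simp only [List.foldl_cons, List.filter_cons]
    by_cases h : PySem.Int.band a x == x
    · rw [if_pos h, ih]
      simp only [superB, h, if_pos, List.length_cons]
      push_cast
      omega
    · rw [if_neg h, ih]
      simp [superB, h]

-- the Python shift of 1 by a Nat amount is a Nat power cast
lemma one_shiftN (k : Nat) : (1 : Int) <<< k = ((1 <<< k : Nat) : Int) := by
  exact_mod_cast (Int.natCast_shiftLeft 1 k).symm

-- same, with the amount cast to Int (as A's port elaborates `1 <<< i.toNat`)
lemma one_shift_intCast (k : Nat) : (1 : Int) <<< ((k : Nat) : Int) = ((1 <<< k : Nat) : Int) := by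
  rw [Int.shiftLeft_eq_mul_pow]
  simp [Nat.shiftLeft_eq]

-- Nat: x &&& m = m iff x has every bit of m
lemma nat_and_eq_right (x m : Nat) : x &&& m = m ↔ ∀ j, m.testBit j = true → x.testBit j = true := by
  constructor
  · intro h j hj
    have := congrArg (fun n => Nat.testBit n j) h
    simp only [Nat.testBit_and] at this
    cases hx : x.testBit j <;> simp_all
  · intro h
    apply Nat.eq_of_testBit_eq
    intro j
    simp only [Nat.testBit_and]
    cases hm : m.testBit j
    · simp
    · simp [h j hm]

-- Nat: m &&& c = 0 iff c misses every bit of m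
lemma nat_and_eq_zero (m c : Nat) : m &&& c = 0 ↔ ∀ j, m.testBit j = true → c.testBit j = false := by
  constructor
  · intro h j hj
    have := congrArg (fun n => Nat.testBit n j) h
    simp only [Nat.testBit_and, Nat.zero_testBit] at this
    cases hc : c.testBit j <;> simp_all
  · intro h
    apply Nat.eq_of_testBit_eq
    intro j
    simp only [Nat.testBit_and, Nat.zero_testBit]
    cases hm : m.testBit j
    · simp
    · simp [h j hm]

-- supermask-of-↑m, characterised bitwise
lemma superB_iff (m : Nat) (a : Int) :
    superB ((m : Nat) : Int) a = true ↔ ∀ j, m.testBit j = true → aBit a j = true := by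
  unfold superB aBit PySem.Int.band
  by_cases ha : 0 ≤ a
  · rw [if_pos ha, if_pos (Int.natCast_nonneg m)]
    simp only [Int.toNat_natCast, beq_iff_eq, Int.natCast_inj, ha, if_pos]
    exact nat_and_eq_right a.toNat m
  · rw [if_neg ha, if_pos (Int.natCast_nonneg m)]
    simp only [Int.toNat_natCast, beq_iff_eq, Int.natCast_inj, if_neg ha]
    have hle : m &&& (-a - 1).toNat ≤ m := Nat.and_le_left
    constructor
    · intro h j hj
      have hz : m &&& (-a - 1).toNat = 0 := by omega
      rw [(nat_and_eq_zero m (-a - 1).toNat).mp hz j hj]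
      rfl
    · intro h
      have hz : m &&& (-a - 1).toNat = 0 := by
        rw [nat_and_eq_zero]
        intro j hj
        have hb := h j hj
        cases hc : (-a - 1).toNat.testBit j
        · rfl
        · rw [hc] at hb
          exact absurd hb (by decide)
      omega

-- splitting a supermask test at one OR-ed-in bit
lemma superB_or (a : Int) (m k : Nat) :
    superB (((m ||| 1 <<< k : Nat) : Nat) : Int) a = (superB ((m : Nat) : Int) a && aBit a k) := by
  rw [Bool.eq_iff_iff, superB_iff, Bool.and_eq_true, superB_iff]
  constructor
  · intro h
    refine ⟨fun j hj => h j ?_, h k ?_⟩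
    · simp [Nat.testBit_or, hj]
    · simp [Nat.testBit_or, Nat.one_shiftLeft]
  · rintro ⟨h1, h2⟩ j hj
    rw [Nat.testBit_or, Bool.or_eq_true, Nat.one_shiftLeft, Nat.testBit_two_pow] at hj
    rcases hj with hj | hj
    · exact h1 j hj
    · simp only [decide_eq_true_eq] at hj
      rwa [← hj]

-- B's test is the two's-complement bit
-- Python's arithmetic right shift on a negative int, through the one's complement
lemma shr_neg (c : Nat) (k : Nat) : ((-(c : Int) - 1) >>> (k : Nat)) = -((c >>> k : Nat) : Int) - 1 := by
  induction k with
  | zero => simp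
  | succ k ih =>
    have hInt : (-(c : Int) - 1) >>> (k + 1 : Nat) = ((-(c : Int) - 1) >>> (k : Nat)) / 2 := by
      rw [Int.shiftRight_eq_div_pow, Int.shiftRight_eq_div_pow, pow_succ]
      push_cast
      rw [Int.ediv_ediv_of_nonneg]
      positivity
    rw [hInt, ih, Nat.shiftRight_succ]
    omega

-- B's test is the two's-complement bit
lemma bit_test (a : Int) (k : Nat) :
    (PySem.Int.band (a >>> k) 1 != 0) = aBit a k := by
  unfold aBit
  by_cases ha : 0 ≤ a
  · rw [if_pos ha]
    have hsh : a >>> (k : Nat) = ((a.toNat >>> k : Nat) : Int) := by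
      rw [Int.natCast_shiftRight, Int.toNat_of_nonneg ha]
    rw [hsh]
    have hb : PySem.Int.band ((a.toNat >>> k : Nat) : Int) 1
        = (((a.toNat >>> k) &&& 1 : Nat) : Int) := by
      rw [show (1 : Int) = ((1 : Nat) : Int) by rfl, PySem.Int.band_natCast]
    rw [hb]
    have hT : a.toNat.testBit k = ((a.toNat >>> k) &&& 1 != 0) := by
      rw [Nat.and_comm]
      rfl
    rw [hT, Nat.and_comm]
    have hn : 1 &&& (a.toNat >>> k) ≤ 1 := Nat.and_le_left
    rcases Nat.le_one_iff_eq_zero_or_eq_one.mp hn with h1 | h1 <;> rw [h1] <;> decide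
  · rw [if_neg ha]
    have hsr := shr_neg (-a - 1).toNat k
    rw [show -((((-a - 1).toNat : Nat)) : Int) - 1 = a by omega] at hsr
    rw [hsr]
    set x := (-a - 1).toNat >>> k with hx
    have hx0 : (0 : Int) ≤ ((x : Nat) : Int) := Int.natCast_nonneg x
    have hband : PySem.Int.band (-((x : Nat) : Int) - 1) 1 = ((1 - (1 &&& x) : Nat) : Int) := by
      unfold PySem.Int.band
      rw [if_neg (by intro hcon; omega), if_pos (by norm_num : (0:Int) ≤ 1)]
      norm_num
    rw [hband]
    have ht : (-a - 1).toNat.testBit k = (1 &&& x != 0) := by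
      rw [hx]
      rfl
    rw [ht]
    have hn : 1 &&& x ≤ 1 := Nat.and_le_left
    rcases Nat.le_one_iff_eq_zero_or_eq_one.mp hn with h1 | h1 <;> rw [h1] <;> decide

-- descending range peels its head
lemma pyRange_down (k : Nat) :
    PySem.List.pyRange ((k : Nat) : Int) (-1) (-1)
      = ((k : Nat) : Int) :: PySem.List.pyRange (((k : Nat) : Int) - 1) (-1) (-1) := by
  cases k with
  | zero => decide
  | succ n =>
    simp only [PySem.List.pyRange]
    norm_num
    rw [show ((n : Int) + 1 + 1).toNat = n + 2 by omega, if_pos (by omega : (-1 : Int) < (n : Int))]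
    rw [show n + 2 = (n + 1) + 1 by ring, List.range_succ_eq_map]
    simp only [List.map_cons, List.map_map]
    norm_num

-- B's port mirrors goN
lemma solveGo_eq (k : Nat) (xs : List Int) :
    solveGo (((k : Nat) : Int) - 1) xs = ((goN k xs : Nat) : Int) := by
  induction k generalizing xs with
  | zero => rw [solveGo]; simp [goN]
  | succ k ih =>
    rw [solveGo]
    have h0 : ¬ (((k + 1 : Nat) : Int) - 1 < 0) := by push_cast; omega
    rw [if_neg h0]
    have ht : (((k + 1 : Nat) : Int) - 1).toNat = k := by omega
    have ht2 : ((k + 1 : Nat) : Int) - 1 - 1 = ((k : Nat) : Int) - 1 := by push_cast; ring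
    simp only [ht, ht2]
    simp only [bit_test]
    rw [goN]
    by_cases hL : 3 < (xs.filter (fun a => aBit a k)).length
    · rw [if_pos (by simpa using hL), if_pos hL, ih]
      rw [one_shiftN, PySem.Int.bor_natCast]
    · rw [if_neg (by simpa using hL), if_neg hL, ih]

-- A's fold from a committed mask m = m ||| (B's recursion on the supermasks of m)
lemma main_lemma (A : List Int) : ∀ (k : Nat) (m : Nat),
    (PySem.List.pyRange (((k : Nat) : Int) - 1) (-1) (-1)).foldl
      (fun ans i =>
        let temp := PySem.Int.bor ans ((1 : Int) <<< i.toNat)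
        if check temp A == 1 then temp else ans) ((m : Nat) : Int)
      = (((m ||| goN k (A.filter (superB ((m : Nat) : Int))) : Nat) : Nat) : Int) := by
  intro k
  induction k with
  | zero =>
    intro m
    have : PySem.List.pyRange (((0 : Nat) : Int) - 1) (-1) (-1) = [] := by decide
    rw [this]
    simp only [List.foldl_nil, goN]
    simp
  | succ k ih =>
    intro m
    have hpr : (((k + 1 : Nat) : Int)) - 1 = ((k : Nat) : Int) := by push_cast; ring
    rw [hpr, pyRange_down k, List.foldl_cons]
    have hsh : (PySem.Int.bor ((m : Nat) : Int) ((1 : Int) <<< ((((k : Nat) : Int).toNat : Nat) : Int)))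
        = (((m ||| 1 <<< k : Nat) : Nat) : Int) := by
      rw [show (((((k : Nat) : Int).toNat : Nat)) : Int) = ((k : Nat) : Int) by omega,
        one_shift_intCast, PySem.Int.bor_natCast]
    have hfilt : (A.filter (superB ((m : Nat) : Int))).filter (fun a => aBit a k)
        = A.filter (superB (((m ||| 1 <<< k : Nat) : Nat) : Int)) := by
      rw [List.filter_filter]
      apply List.filter_congr
      intro a _
      rw [superB_or, Bool.and_comm]
    have hcheck : check (((m ||| 1 <<< k : Nat) : Nat) : Int) A
        = if 3 < (A.filter (superB (((m ||| 1 <<< k : Nat) : Nat) : Int))).length then 1 else 0 := by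
      unfold check
      rw [count_eq_filter_length]
      by_cases hL : 3 < (A.filter (superB (((m ||| 1 <<< k : Nat) : Nat) : Int))).length
      · rw [if_pos hL, if_pos (by omega)]
      · rw [if_neg hL, if_neg (by omega)]
    simp only [hsh, hcheck]
    rw [goN]
    simp only [← hfilt]
    by_cases hL : 3 < ((A.filter (superB ((m : Nat) : Int))).filter (fun a => aBit a k)).length
    · rw [hfilt] at hL
      rw [if_pos (by rw [hfilt]; simpa using hL)]
      rw [if_pos (by rw [← hfilt] at hL; simpa using hL)]
      rw [ih (m ||| 1 <<< k), hfilt, Nat.or_assoc]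
    · rw [hfilt] at hL
      rw [if_neg (by rw [hfilt]; simpa using hL)]
      rw [if_neg (by rw [← hfilt] at hL; simpa using hL)]
      exact ih m

-- ===== VERDICT (by name: the statement is the Claim_ definition above) =====
theorem solve_spec : Claim_equal_solve := by
  intro A _
  unfold Spec_solve solve solve_alt
  have h32 : (32 : Int) = ((33 : Nat) : Int) - 1 := by norm_num
  rw [h32, solveGo_eq 33 A]
  have h0 : A.filter (superB ((0 : Nat) : Int)) = A := by
    simp [superB, PySem.Int.band]
  have := main_lemma A 33 0
  rw [h0] at this
  simpa using this
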